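-- pv_equiv track=rewrite | github.com/patallen/floorcast | scripts/mermaid_layers.py | generate_grouped_mermaid
-- ===== SOURCE A (Python) =====
-- LAYERS = {
--     "domain": "Domain",
--     "infrastructure": "Infrastructure",
--     "adapters": "Adapters",
--     "services": "Services",
--     "repositories": "Repositories",
--     "api": "API",
-- }
--
-- def get_layer(node: str) -> str | None:
--     """Get layer name for a node."""
--     if node.startswith("floorcast."):
--         parts = node.split(".")
--         if len(parts) >= 2:
--             return parts[1]
--     return None
--
-- def group_by_layer(nodes: set[str]) -> dict[str, list[str]]:
--     """Group nodes by layer."""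
--     groups: dict[str, list[str]] = {layer: [] for layer in LAYERS}
--     groups["other"] = []
--
--     for node in sorted(nodes):
--         layer = get_layer(node)
--         if layer in LAYERS:
--             groups[layer].append(node)
--         else:
--             groups["other"].append(node)
--
--     return groups
--
-- def generate_grouped_mermaid(edges: list[str], nodes: set[str]) -> str:
--     """Generate mermaid with subgraphs."""
--     groups = group_by_layer(nodes)
--     lines = ["graph TD"]
--
--     # Add subgraphs for each layer
--     for layer_key, layer_name in LAYERS.items():
--         layer_nodes = groups[layer_key]
--         if layer_nodes:
--             lines.append(f"    subgraph {layer_key}[{layer_name}]")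
--             for node in layer_nodes:
--                 short = node.replace("floorcast.", "")
--                 lines.append(f"        {node}[{short}]")
--             lines.append("    end")
--             lines.append("")
--
--     # Add other nodes (main, floorcast.ingest, etc.)
--     if groups["other"]:
--         lines.append("    %% Other")
--         for node in groups["other"]:
--             lines.append(f"    {node}")
--         lines.append("")
--
--     # Add edges
--     lines.append("    %% Dependencies")
--     for edge in edges:
--         lines.append(f"    {edge}")
--
--     return "\n".join(lines)
-- ===== SOURCE B (Python) =====
-- LAYERS = {
--     "domain": "Domain",
--     "infrastructure": "Infrastructure",
--     "adapters": "Adapters",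
--     "services": "Services",
--     "repositories": "Repositories",
--     "api": "API",
-- }
--
-- def get_layer(node: str) -> str | None:
--     """Get layer name for a node."""
--     if node.startswith("floorcast."):
--         parts = node.split(".")
--         if len(parts) >= 2:
--             return parts[1]
--     return None
--
-- def generate_grouped_mermaid(edges: list[str], nodes: set[str]) -> str:
--     """Generate mermaid with subgraphs (no intermediate dict: per-section filtered scans)."""
--     ordered = sorted(nodes)
--     out = ["graph TD"]
--
--     for layer_key, layer_name in LAYERS.items():
--         sel = [n for n in ordered if get_layer(n) == layer_key]
--         if sel:
--             out.append(f"    subgraph {layer_key}[{layer_name}]")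
--             for n in sel:
--                 out.append(f"        {n}[{n.replace('floorcast.', '')}]")
--             out.append("    end")
--             out.append("")
--
--     other = [n for n in ordered if get_layer(n) not in LAYERS]
--     if other:
--         out.append("    %% Other")
--         for n in other:
--             out.append(f"    {n}")
--         out.append("")
--
--     out.append("    %% Dependencies")
--     for e in edges:
--         out.append(f"    {e}")
--
--     return "\n".join(out)
-- ===== Notes on version B (the rewrite author's own statement) =====
-- stated objective: simpler
-- what changed: B drops the intermediate group_by_layer dict entirely: it sorts the nodes once and builds each subgraph section (and the 'other' section) by an inline filtered scan of the sorted list, instead of A's bucketize-into-dict pass followed by a dict-lookup emit pass.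
import Mathlib
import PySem

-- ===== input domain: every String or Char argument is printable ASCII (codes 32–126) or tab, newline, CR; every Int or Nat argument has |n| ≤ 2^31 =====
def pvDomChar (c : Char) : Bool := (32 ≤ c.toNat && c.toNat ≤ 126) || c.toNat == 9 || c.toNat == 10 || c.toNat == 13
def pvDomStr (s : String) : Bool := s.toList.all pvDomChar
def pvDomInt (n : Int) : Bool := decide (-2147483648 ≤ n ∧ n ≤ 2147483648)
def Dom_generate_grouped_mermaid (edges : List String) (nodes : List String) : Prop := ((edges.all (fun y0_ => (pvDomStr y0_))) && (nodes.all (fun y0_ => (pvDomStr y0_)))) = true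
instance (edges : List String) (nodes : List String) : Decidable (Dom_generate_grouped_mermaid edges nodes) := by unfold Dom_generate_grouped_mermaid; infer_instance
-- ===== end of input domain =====

-- B drops A's intermediate bucketizing dict: each section is an inline filtered scan of the sorted nodes (objective: simpler, same cost).
-- `nodes` is a Python set: the List String argument holds its distinct elements.

-- ===== PORT A =====
def pvLAYERS : List (String × String) :=
  [("domain", "Domain"), ("infrastructure", "Infrastructure"), ("adapters", "Adapters"),
   ("services", "Services"), ("repositories", "Repositories"), ("api", "API")]

def pvGetLayer (node : String) : Option String :=
  if PySem.Str.startswith node "floorcast." then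
    let parts := (PySem.Str.split? node ".").getD []   -- sep "." is nonempty, split? never none
    if parts.length ≥ 2 then parts[1]? else none
  else none

def pvInitGroups : PySem.Dict String (List String) :=
  (pvLAYERS.foldl (fun d p => d.insert p.1 ([] : List String)) PySem.Dict.empty).insert "other" []

def pvGroupByLayer (nodes : List String) : PySem.Dict String (List String) :=
  (PySem.List.sorted nodes (fun x => x) false).foldl
    (fun g node =>
      match pvGetLayer node with
      | some l =>
          if (pvLAYERS.map Prod.fst).contains l then g.modify l [] (· ++ [node])
          else g.modify "other" [] (· ++ [node])
      | none => g.modify "other" [] (· ++ [node]))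
    pvInitGroups

def generate_grouped_mermaid (edges : List String) (nodes : List String) : String :=
  let groups := pvGroupByLayer nodes
  let lines : List String := ["graph TD"]
  let lines := pvLAYERS.foldl
    (fun lines p =>
      let layer_nodes := groups.getD p.1 []
      if layer_nodes = [] then lines
      else
        lines ++ ["    subgraph " ++ p.1 ++ "[" ++ p.2 ++ "]"]
          ++ layer_nodes.map (fun node =>
              "        " ++ node ++ "[" ++ PySem.Str.replace node "floorcast." "" ++ "]")
          ++ ["    end", ""]) lines
  let other := groups.getD "other" []
  let lines := if other = [] then lines
    else lines ++ ["    %% Other"] ++ other.map (fun node => "    " ++ node) ++ [""]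
  let lines := lines ++ ["    %% Dependencies"] ++ edges.map (fun edge => "    " ++ edge)
  PySem.Str.join "\n" lines

-- ===== PORT B =====
def generate_grouped_mermaid_alt (edges : List String) (nodes : List String) : String :=
  let ordered := PySem.List.sorted nodes (fun x => x) false
  let out : List String := ["graph TD"]
  let out := pvLAYERS.foldl
    (fun out p =>
      let sel := ordered.filter (fun n => pvGetLayer n == some p.1)
      if sel = [] then out
      else
        out ++ ["    subgraph " ++ p.1 ++ "[" ++ p.2 ++ "]"]
          ++ sel.map (fun n =>
              "        " ++ n ++ "[" ++ PySem.Str.replace n "floorcast." "" ++ "]")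
          ++ ["    end", ""]) out
  let other := ordered.filter (fun n =>
    match pvGetLayer n with
    | some l => !((pvLAYERS.map Prod.fst).contains l)
    | none => true)
  let out := if other = [] then out
    else out ++ ["    %% Other"] ++ other.map (fun n => "    " ++ n) ++ [""]
  let out := out ++ ["    %% Dependencies"] ++ edges.map (fun e => "    " ++ e)
  PySem.Str.join "\n" out

-- ===== PRECONDITION & SPEC =====
def Spec_generate_grouped_mermaid (edges : List String) (nodes : List String) (out : String) : Prop := out = generate_grouped_mermaid_alt edges nodes
instance (edges : List String) (nodes : List String) (out : String) : Decidable (Spec_generate_grouped_mermaid edges nodes out) := by unfold Spec_generate_grouped_mermaid; infer_instance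

-- ===== CLAIM (what is proved, stated in full; the proofs are below) =====
def Claim_equal_generate_grouped_mermaid : Prop := ∀ (edges : List String) (nodes : List String), Dom_generate_grouped_mermaid edges nodes → Spec_generate_grouped_mermaid edges nodes (generate_grouped_mermaid edges nodes)

-- ===== LEMMAS AND PROOFS =====

-- the key each node is appended under in A's grouping loop
def pvBucket (node : String) : String :=
  match pvGetLayer node with
  | some l => if (pvLAYERS.map Prod.fst).contains l then l else "other"
  | none => "other"

theorem pvInitGroups_getD (k : String) : pvInitGroups.getD k [] = [] := by
  simp [pvInitGroups, pvLAYERS, List.foldl, PySem.Dict.getD_insert, PySem.Dict.getD_empty]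

theorem pvGroupByLayer_getD (nodes : List String) (k : String) :
    (pvGroupByLayer nodes).getD k []
      = (PySem.List.sorted nodes (fun x => x) false).filter (fun n => pvBucket n == k) := by
  unfold pvGroupByLayer
  rw [PySem.List.foldl_congr_mem _ _
        (fun g node => g.modify (pvBucket node) [] (· ++ [node])) _
        (by
          intro acc x _
          cases h : pvGetLayer x
          · simp only [pvBucket, h]
          · simp only [pvBucket, h]
            rename_i l
            by_cases hc : (pvLAYERS.map Prod.fst).contains l = true
            · rw [if_pos hc, if_pos hc]
            · rw [if_neg hc, if_neg hc])]
  rw [show (PySem.List.sorted nodes (fun x => x) false).foldl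
        (fun g node => g.modify (pvBucket node) [] (· ++ [node])) pvInitGroups
      = ((PySem.List.sorted nodes (fun x => x) false).map (fun n => (pvBucket n, n))).foldl
        (fun d p => d.modify p.1 [] (· ++ [p.2])) pvInitGroups from (List.foldl_map (f := fun n => ((pvBucket n, n) : String × String))
        (g := fun d p => d.modify p.1 [] (· ++ [p.2]))
        (l := PySem.List.sorted nodes (fun x => x) false) (init := pvInitGroups)).symm]
  rw [PySem.Dict.getD_foldl_modify_append, pvInitGroups_getD, List.nil_append, List.filter_map,
      List.map_map]
  show List.map (fun n => n) (List.filter (fun n => pvBucket n == k) _) = _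
  rw [List.map_id']

theorem pvBucket_filter_key (k : String) (hk : (pvLAYERS.map Prod.fst).contains k = true)
    (l : List String) :
    l.filter (fun n => pvBucket n == k) = l.filter (fun n => pvGetLayer n == some k) := by
  apply List.filter_congr
  intro n _
  unfold pvBucket
  have hko : k ≠ "other" := by
    simp [pvLAYERS] at hk
    rcases hk with h | h | h | h | h | h <;> subst h <;> decide
  cases hgl : pvGetLayer n
  · dsimp only; simp [Ne.symm hko]
  · rename_i x
    dsimp only
    by_cases hx : (pvLAYERS.map Prod.fst).contains x = true
    · rw [if_pos hx]; simp
    · have hxk : x ≠ k := by intro h; subst h; exact hx hk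
      rw [if_neg hx]; simp [Ne.symm hko, hxk]

theorem pvBucket_filter_other (l : List String) :
    l.filter (fun n => pvBucket n == "other")
      = l.filter (fun n =>
          match pvGetLayer n with
          | some x => !((pvLAYERS.map Prod.fst).contains x)
          | none => true) := by
  apply List.filter_congr
  intro n _
  unfold pvBucket
  cases hgl : pvGetLayer n
  · dsimp only; decide
  · rename_i x
    dsimp only
    by_cases hx : (pvLAYERS.map Prod.fst).contains x = true
    · have hxo : x ≠ "other" := by
        simp [pvLAYERS] at hx
        rcases hx with h | h | h | h | h | h <;> subst h <;> decide
      rw [if_pos hx, hx]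
      simp [hxo]
    · rw [if_neg hx, Bool.eq_false_iff.mpr hx]
      simp

-- ===== VERDICT (by name: the statement is the Claim_ definition above) =====
theorem generate_grouped_mermaid_spec : Claim_equal_generate_grouped_mermaid := by
  intro edges nodes _
  unfold Spec_generate_grouped_mermaid generate_grouped_mermaid generate_grouped_mermaid_alt
  dsimp only
  rw [pvGroupByLayer_getD, pvBucket_filter_other]
  rw [PySem.List.foldl_congr_mem pvLAYERS _
        (fun out p =>
          let sel := (PySem.List.sorted nodes (fun x => x) false).filter
            (fun n => pvGetLayer n == some p.1)
          if sel = [] then out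
          else
            out ++ ["    subgraph " ++ p.1 ++ "[" ++ p.2 ++ "]"]
              ++ sel.map (fun n =>
                  "        " ++ n ++ "[" ++ PySem.Str.replace n "floorcast." "" ++ "]")
              ++ ["    end", ""]) _
        (by
          intro acc p hp
          have hk : (pvLAYERS.map Prod.fst).contains p.1 = true := by
            simp [pvLAYERS] at hp ⊢
            rcases hp with h | h | h | h | h | h <;> subst h <;> simp
          rw [pvGroupByLayer_getD, pvBucket_filter_key p.1 hk])]
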